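-- pv_equiv track=rewrite | github.com/Occy88/AIPrinciples | Planning/pypddl/Parser.py | clean_pddl_data
-- ===== SOURCE A (Python) =====
-- def clean_pddl_data(data):
--     lines = data.split("\n")
--     # get ridd of comments
--     for i in range(len(lines)):
--         lines[i] = lines[i].split(";")[0]
--     data = ''.join(lines)
--     data = data.strip()
--     data = data.replace('\n', '')
--     data = data.replace('\t', '')
--     return data
-- ===== SOURCE B (Python) =====
-- def clean_pddl_data(data):
--     # one character-level pass with a comment flag, instead of split/slice/join/replace passes
--     result = []
--     in_comment = False
--     for c in data:
--         if c == '\n':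
--             in_comment = False
--         elif in_comment:
--             pass
--         elif c == ';':
--             in_comment = True
--         elif c == '\t':
--             pass
--         else:
--             result.append(c)
--     return ''.join(result).strip()
-- ===== Notes on version B (the rewrite author's own statement) =====
-- stated objective: simpler
-- what changed: Replaced the split-into-lines / slice-each-line / join / strip / two-replace pipeline by a single character-level scan that maintains an in_comment flag and one output buffer, followed by one strip.
import Mathlib
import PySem

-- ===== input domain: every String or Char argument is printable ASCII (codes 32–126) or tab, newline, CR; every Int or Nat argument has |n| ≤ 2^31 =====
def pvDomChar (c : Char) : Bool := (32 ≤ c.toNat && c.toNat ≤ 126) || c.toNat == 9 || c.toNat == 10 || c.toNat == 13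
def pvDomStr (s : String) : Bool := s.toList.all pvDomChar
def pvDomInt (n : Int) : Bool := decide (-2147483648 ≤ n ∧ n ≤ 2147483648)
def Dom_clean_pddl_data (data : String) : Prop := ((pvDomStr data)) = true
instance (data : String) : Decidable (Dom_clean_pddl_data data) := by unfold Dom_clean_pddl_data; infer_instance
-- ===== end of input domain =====

-- B replaces A's split-lines/slice/join/strip/replace pipeline by one character scan with a comment flag; objective: simpler.

-- ===== PORT A =====
def clean_pddl_data (data : String) : String :=
  -- lines = data.split("\n")  (sep is nonempty, so split? is always `some`)
  let lines := (PySem.Str.split? data "\n").getD []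
  -- lines[i] = lines[i].split(";")[0]  (split always returns a nonempty list, so [0] is its head)
  let lines := lines.map (fun l => ((PySem.Str.split? l ";").getD []).headD "")
  let d := PySem.Str.join "" lines
  let d := PySem.Str.strip d
  let d := PySem.Str.replace d "\n" ""
  let d := PySem.Str.replace d "\t" ""
  d

-- ===== PORT B =====
-- one step of B's loop: state = (result buffer, in_comment flag)
def pvAltStep (st : List Char × Bool) (c : Char) : List Char × Bool :=
  if c = '\n' then (st.1, false)
  else if st.2 then st
  else if c = ';' then (st.1, true)
  else if c = '\t' then st
  else (st.1 ++ [c], st.2)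

def clean_pddl_data_alt (data : String) : String :=
  let st := data.toList.foldl pvAltStep ([], false)
  PySem.Str.strip (String.ofList st.1)

-- ===== PRECONDITION & SPEC =====
def Spec_clean_pddl_data (data : String) (out : String) : Prop := out = clean_pddl_data_alt data
instance (data : String) (out : String) : Decidable (Spec_clean_pddl_data data out) := by unfold Spec_clean_pddl_data; infer_instance

-- ===== CLAIM (what is proved, stated in full; the proofs are below) =====
def Claim_equal_clean_pddl_data : Prop := ∀ (data : String), Dom_clean_pddl_data data → Spec_clean_pddl_data data (clean_pddl_data data)

-- ===== LEMMAS AND PROOFS =====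

-- proof-side model of Python's str.split on a single-character separator
def pvSplitC (sep : Char) : List Char → List (List Char)
  | [] => [[]]
  | c :: cs => if c = sep then [] :: pvSplitC sep cs
               else (pvSplitC sep cs).modifyHead (c :: ·)

-- A's comment filter at character level (newlines dropped by the join, tabs kept)
def pvG : Bool → List Char → List Char
  | _, [] => []
  | inc, c :: cs =>
    if c = '\n' then pvG false cs
    else if inc then pvG inc cs
    else if c = ';' then pvG true cs
    else c :: pvG inc cs

-- B's scan (tabs dropped inline)
def pvH : Bool → List Char → List Char
  | _, [] => []
  | inc, c :: cs =>
    if c = '\n' then pvH false cs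
    else if inc then pvH inc cs
    else if c = ';' then pvH true cs
    else if c = '\t' then pvH inc cs
    else c :: pvH inc cs

theorem pvSplitC_ne_nil (sep : Char) (l : List Char) : pvSplitC sep l ≠ [] := by
  cases l with
  | nil => simp [pvSplitC]
  | cons c cs =>
    simp only [pvSplitC]
    split_ifs
    · simp
    · cases h : pvSplitC sep cs with
      | nil => exact absurd h (pvSplitC_ne_nil sep cs)
      | cons a t => simp [h]

theorem pv_modifyHead_id (L : List (List Char)) : L.modifyHead (fun x => x) = L := by
  cases L <;> rfl

theorem pv_splitOn_go (sep : Char) (l : List Char) (fuel : Nat) (cur : List Char)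
    (acc : List (List Char)) (h : l.length < fuel) :
    PySem.Chars.splitOn.go [sep] fuel l cur acc
      = acc.reverse ++ (pvSplitC sep l).modifyHead (cur.reverse ++ ·) := by
  induction l generalizing fuel cur acc with
  | nil =>
    cases fuel with
    | zero => omega
    | succ f => rw [PySem.Chars.splitOn.go] <;> simp [pvSplitC]
  | cons c cs ih =>
    cases fuel with
    | zero => omega
    | succ f =>
      simp only [List.length_cons] at h
      rw [PySem.Chars.splitOn.go]
      have hpre : List.isPrefixOf [sep] (c :: cs) = (sep == c) := by
          simp [List.isPrefixOf]
      rw [hpre]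
      by_cases hc : sep = c
      · rw [if_pos (by simp [hc])]
        have hdrop : List.drop [sep].length (c :: cs) = cs := by simp
        rw [hdrop, ih f [] _ (by omega)]
        subst hc
        simp only [pvSplitC, if_pos rfl]
        simp [pv_modifyHead_id]
      · rw [if_neg (by simp; exact fun hh => hc hh)]
        rw [ih f (c :: cur) _ (by omega)]
        have hne : ¬ c = sep := fun hh => hc hh.symm
        simp only [pvSplitC, hne, if_false]
        cases hS : pvSplitC sep cs with
        | nil => exact absurd hS (pvSplitC_ne_nil sep cs)
        | cons a t => simp [List.modifyHead]

theorem pv_splitOn_eq (sep : Char) (l : List Char) :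
    PySem.Chars.splitOn l [sep] = pvSplitC sep l := by
  have h := pv_splitOn_go sep l (l.length + 1) [] [] (by omega)
  simpa [PySem.Chars.splitOn, pv_modifyHead_id] using h

theorem pv_head_splitC (l : List Char) :
    (pvSplitC ';' l).headD [] = l.takeWhile (fun c => c != ';') := by
  induction l with
  | nil => simp [pvSplitC]
  | cons c cs ih =>
    simp only [pvSplitC]
    by_cases hc : c = ';'
    · subst hc; simp
    · have hp : (c != ';') = true := by simpa using hc
      simp only [hc, if_false, List.takeWhile_cons, hp, if_pos]
      cases hS : pvSplitC ';' cs with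
      | nil => exact absurd hS (pvSplitC_ne_nil ';' cs)
      | cons a t =>
        rw [hS] at ih
        simp only [List.modifyHead_cons, List.headD_cons, List.headD_cons] at *
        simp [ih]

theorem pv_join_empty (parts : List (List Char)) :
    PySem.Chars.join [] parts = parts.flatten := by
  induction parts with
  | nil => simp [PySem.Chars.join, List.intercalate]
  | cons p ps ih =>
    cases ps with
    | nil => simp [PySem.Chars.join, List.intercalate]
    | cons q qs =>
      simp only [PySem.Chars.join, List.intercalate] at *
      simp [List.intersperse] at *
      simp [ih]

theorem pv_core (cs : List Char) :
    ((pvSplitC '\n' cs).map (fun l => l.takeWhile (fun c => c != ';'))).flatten = pvG false cs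
    ∧ ((pvSplitC '\n' cs).tail.map (fun l => l.takeWhile (fun c => c != ';'))).flatten = pvG true cs := by
  induction cs with
  | nil => simp [pvSplitC, pvG]
  | cons c cs ih =>
    obtain ⟨ih1, ih2⟩ := ih
    by_cases hn : c = '\n'
    · subst hn
      simp [pvSplitC, pvG, ih1]
    · cases hS : pvSplitC '\n' cs with
      | nil => exact absurd hS (pvSplitC_ne_nil '\n' cs)
      | cons a t =>
        rw [hS] at ih1 ih2
        simp only [List.tail_cons] at ih2
        by_cases hs : c = ';'
        · subst hs
          simp only [pvSplitC, pvG, hn, if_false, if_pos rfl, hS, List.modifyHead_cons,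
            List.map_cons, List.flatten_cons, List.takeWhile_cons, List.tail_cons,
            bne_self_eq_false, Bool.false_eq_true, List.nil_append]
          exact ⟨ih2, ih2⟩
        · have hp : (c != ';') = true := by simpa using hs
          simp only [pvSplitC, pvG, hn, hs, if_false, hS, List.modifyHead_cons,
            List.map_cons, List.flatten_cons, List.takeWhile_cons, List.tail_cons, hp,
            if_pos, List.cons_append]
          constructor
          · rw [← ih1]; simp
          · exact ih2

theorem pv_newline_not_mem (b : Bool) (cs : List Char) : '\n' ∉ pvG b cs := by
  induction cs generalizing b with
  | nil => simp [pvG]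
  | cons c cs ih =>
    simp only [pvG]
    split_ifs with h1 h2 h3
    · exact ih false
    · exact ih b
    · exact ih true
    · intro hm
      rcases List.mem_cons.mp hm with h | h
      · exact h1 h.symm
      · exact ih b h

theorem pv_replace_go (x : Char) (l : List Char) (fuel : Nat) (acc : List Char)
    (h : l.length ≤ fuel) :
    PySem.Chars.replace.go [x] [] fuel l acc = acc.reverse ++ l.filter (fun c => c != x) := by
  induction l generalizing fuel acc with
  | nil =>
    cases fuel with
    | zero => rw [PySem.Chars.replace.go]; simp
    | succ f => rw [PySem.Chars.replace.go] <;> simp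
  | cons c cs ih =>
    cases fuel with
    | zero => simp at h
    | succ f =>
      simp only [List.length_cons] at h
      rw [PySem.Chars.replace.go]
      have hpre : List.isPrefixOf [x] (c :: cs) = (x == c) := by
        simp [List.isPrefixOf]
      rw [hpre]
      by_cases hc : x = c
      · rw [if_pos (by simp [hc])]
        have hdrop : List.drop [x].length (c :: cs) = cs := by simp
        rw [hdrop, ih f _ (by omega)]
        subst hc
        simp
      · rw [if_neg (by simp; exact fun hh => hc hh)]
        rw [ih f _ (by omega)]
        have hp : (c != x) = true := by simpa using fun hh => hc hh.symm
        simp [List.filter_cons, hp]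

theorem pv_replace_single (x : Char) (l : List Char) :
    PySem.Chars.replace l [x] [] = l.filter (fun c => c != x) := by
  simpa [PySem.Chars.replace] using pv_replace_go x l l.length [] (le_refl _)

theorem pv_filter_dropWhile (l : List Char) :
    (l.dropWhile PySem.Chars.isspace).filter (fun c => c != '\t')
      = (l.filter (fun c => c != '\t')).dropWhile PySem.Chars.isspace := by
  induction l with
  | nil => simp
  | cons c cs ih =>
    by_cases ht : c = '\t'
    · subst ht
      simp [List.dropWhile_cons, show PySem.Chars.isspace '\t' = true by decide, ih]
    · have hp : (c != '\t') = true := by simpa using ht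
      by_cases hs : PySem.Chars.isspace c = true
      · simp [List.dropWhile_cons, hs, hp, List.filter_cons, ih]
      · simp [List.dropWhile_cons, hs, hp, List.filter_cons]

theorem pv_strip_filter (l : List Char) :
    PySem.Chars.strip (l.filter (fun c => c != '\t'))
      = (PySem.Chars.strip l).filter (fun c => c != '\t') := by
  simp only [PySem.Chars.strip, PySem.Chars.lstrip, PySem.Chars.rstrip]
  rw [← pv_filter_dropWhile, ← List.filter_reverse, ← pv_filter_dropWhile, ← List.filter_reverse]

theorem pv_strip_sublist (l : List Char) : (PySem.Chars.strip l).Sublist l := by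
  simp only [PySem.Chars.strip, PySem.Chars.lstrip, PySem.Chars.rstrip]
  have h1 : (List.dropWhile PySem.Chars.isspace (List.dropWhile PySem.Chars.isspace l).reverse).Sublist
      (List.dropWhile PySem.Chars.isspace l).reverse := List.dropWhile_sublist _
  have h2 := h1.reverse
  simp only [List.reverse_reverse] at h2
  exact h2.trans (List.dropWhile_sublist _)

theorem pv_h_eq_filter (b : Bool) (cs : List Char) :
    pvH b cs = (pvG b cs).filter (fun c => c != '\t') := by
  induction cs generalizing b with
  | nil => simp [pvH, pvG]
  | cons c cs ih =>
    simp only [pvH, pvG]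
    split_ifs with h1 h2 h3 h4
    · exact ih false
    · exact ih b
    · exact ih true
    · subst h4; simp [ih b]
    · have : (c != '\t') = true := by simpa using h4
      simp [List.filter_cons, this, ih b]

theorem pv_foldl_alt (cs : List Char) (acc : List Char) (inc : Bool) :
    (cs.foldl pvAltStep (acc, inc)).1 = acc ++ pvH inc cs := by
  induction cs generalizing acc inc with
  | nil => simp [pvH]
  | cons c cs ih =>
    simp only [List.foldl_cons, pvAltStep, pvH]
    split_ifs with h1 h2 h3 h4
    · exact ih acc false
    · exact ih acc inc
    · exact ih acc true
    · exact ih acc inc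
    · rw [ih (acc ++ [c]) inc]; simp

theorem pv_line (l : String) :
    ((PySem.Str.split? l ";").getD []).headD "" = String.ofList (l.toList.takeWhile (fun c => c != ';')) := by
  have h1 : PySem.Str.split? l ";" = some (List.map String.ofList (pvSplitC ';' l.toList)) := by
    simp [PySem.Str.split?, PySem.Chars.split?, show String.toList ";" = [';'] from rfl,
      pv_splitOn_eq]
  rw [h1]
  cases hS : pvSplitC ';' l.toList with
  | nil => exact absurd hS (pvSplitC_ne_nil _ _)
  | cons a t =>
    have h2 := pv_head_splitC l.toList
    rw [hS] at h2
    simp only [List.headD_cons] at h2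
    simp [h2]

theorem pv_main (data : String) : clean_pddl_data data = clean_pddl_data_alt data := by
  apply String.toList_inj.mp
  -- B side
  have hB : (clean_pddl_data_alt data).toList
      = PySem.Chars.strip ((pvG false data.toList).filter (fun c => c != '\t')) := by
    simp only [clean_pddl_data_alt, PySem.Str.toList_strip, String.toList_ofList]
    rw [pv_foldl_alt, List.nil_append, pv_h_eq_filter]
  -- A side
  have hsplit : PySem.Str.split? data "\n"
      = some (List.map String.ofList (pvSplitC '\n' data.toList)) := by
    simp [PySem.Str.split?, PySem.Chars.split?, show String.toList "\n" = ['\n'] from rfl,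
      pv_splitOn_eq]
  have hmap : List.map String.toList
        (List.map (fun l => ((PySem.Str.split? l ";").getD []).headD "")
          (List.map String.ofList (pvSplitC '\n' data.toList)))
      = List.map (fun m => m.takeWhile (fun c => c != ';')) (pvSplitC '\n' data.toList) := by
    simp only [List.map_map]
    apply List.map_congr_left
    intro m _
    simp only [Function.comp_apply]
    rw [pv_line]
    simp
  have hA : (clean_pddl_data data).toList
      = ((PySem.Chars.strip (pvG false data.toList)).filter (fun c => c != '\n')).filter
          (fun c => c != '\t') := by
    simp only [clean_pddl_data, hsplit, Option.getD_some,
      PySem.Str.toList_replace, PySem.Str.toList_strip, PySem.Str.toList_join,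
      show String.toList "\n" = ['\n'] from rfl, show String.toList "\t" = ['\t'] from rfl,
      show String.toList "" = [] from rfl]
    rw [pv_replace_single, pv_replace_single, hmap, pv_join_empty, (pv_core data.toList).1]
  rw [hA, hB]
  have hnl : (PySem.Chars.strip (pvG false data.toList)).filter (fun c => c != '\n')
      = PySem.Chars.strip (pvG false data.toList) := by
    rw [List.filter_eq_self]
    intro a ha
    have : a ∈ pvG false data.toList := (pv_strip_sublist _).mem ha
    have hne : a ≠ '\n' := fun hh => pv_newline_not_mem false data.toList (hh ▸ this)
    simpa using hne
  rw [hnl, pv_strip_filter]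

-- ===== VERDICT (by name: the statement is the Claim_ definition above) =====
theorem clean_pddl_data_spec : Claim_equal_clean_pddl_data := by
  intro data _
  show clean_pddl_data data = clean_pddl_data_alt data
  exact pv_main data
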